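-- pv_equiv track=rewrite | github.com/TOP-DataScience421/Mezenov | 2024.04.22/3.py | numbers_strip_iterrator
-- ===== SOURCE A (Python) =====
-- def numbers_strip_iterrator(num_list: list, n: int) -> list:
--
--     n_counter = 0
--
--     # Вариант 1. Перебор всех элементов списка, поиск мин/макс "вручную" и удаление этих элементов ихз списка
--     # Итерируемся пока не достигнем кол-ва требуемых обрезок n (итераций)
--     # while n_counter < n:
--             # min_ind = 0
--             # max_ind = 0
--             # for i in range(len(num_list)):
--                 # min_ind = min_ind if num_list[min_ind] < num_list[i] else i
--                 # max_ind = max_ind if num_list[max_ind] > num_list[i] else i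
--             # if num_list:
--                 # num_list.pop(max_ind)
--             # if num_list:
--                 # num_list.pop(min_ind)
--             # n_counter += 1
--
--     # return num_list
--
--     # Вариант 2. Через функции min()/max()
--     # Итерируемся пока не достигнем кол-ва требуемых обрезок n (итераций)
--     while n_counter < n:
--             #Если не проверить, что список еще есть, воткнемся в исключение. Если список уже опустел, ничего страшного, возвращаем пустой
--             try:
--                 num_list.remove(max(num_list))
--                 num_list.remove(min(num_list))
--             except ValueError:
--                 break
--             n_counter += 1
--
--     return num_list
-- ===== SOURCE B (Python) =====
-- def numbers_strip_iterrator(num_list: list, n: int) -> list: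
--     # One sort instead of repeated max/min scans: after t = min(n, ceil(L/2))
--     # rounds the removed elements are exactly the t smallest and t largest of the
--     # multiset, taken at their earliest positions; survivors keep their order.
--     L = len(num_list)
--     t = min(n, (L + 1) // 2)
--     if t > 0 and 2 * t >= L:
--         num_list[:] = []
--         return num_list
--     if t <= 0:
--         return num_list
--     s = sorted(num_list)
--     removed = {}
--     for v in s[:t] + s[L - t:]:
--         removed[v] = removed.get(v, 0) + 1
--     out = []
--     for x in num_list:
--         c = removed.get(x, 0)
--         if c > 0:
--             removed[x] = c - 1
--         else:
--             out.append(x)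
--     num_list[:] = out
--     return num_list
-- ===== Notes on version B (the rewrite author's own statement) =====
-- stated objective: faster
-- what changed: A repeatedly scans the list with max()/min() and list.remove() inside a while loop (O(n*len)); B sorts once, counts per value how many of the t=min(n,ceil(len/2)) smallest and t largest occurrences must go, and emits the survivors in one counting pass (O(len log len)).
import Mathlib
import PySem

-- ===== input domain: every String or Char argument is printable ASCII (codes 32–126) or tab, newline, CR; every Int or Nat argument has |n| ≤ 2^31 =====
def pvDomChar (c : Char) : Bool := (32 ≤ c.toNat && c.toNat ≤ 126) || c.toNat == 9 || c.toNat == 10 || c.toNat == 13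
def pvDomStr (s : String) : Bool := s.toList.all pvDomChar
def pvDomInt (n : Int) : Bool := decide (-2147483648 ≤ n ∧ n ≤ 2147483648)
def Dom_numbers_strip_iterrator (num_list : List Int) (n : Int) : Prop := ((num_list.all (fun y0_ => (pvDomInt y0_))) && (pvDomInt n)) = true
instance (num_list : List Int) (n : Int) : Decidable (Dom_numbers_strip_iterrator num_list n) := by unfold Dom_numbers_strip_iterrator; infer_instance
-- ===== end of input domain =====

-- B replaces A's repeated remove(max)/remove(min) loop by one sort plus a counting
-- pass (measured asymptotically faster). Both A and B mutate num_list in place in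
-- Python ending in the same final contents; the equivalence proved here is about the
-- returned value.

-- ===== PORT A =====
-- while n_counter < n: try: remove(max); remove(min); except ValueError: break
def pvALoop : Nat → List Int → List Int
  | 0, lst => lst
  | Nat.succ k, lst =>
    match PySem.List.max? lst (fun x => x) with
    | none => lst                           -- max([]) raises ValueError → break
    | some mx =>
      match PySem.List.remove? lst mx with
      | none => lst                         -- unreachable (mx ∈ lst)
      | some lst₁ =>
        match PySem.List.min? lst₁ (fun x => x) with
        | none => lst₁                      -- min([]) raises ValueError → break
        | some mn =>
          match PySem.List.remove? lst₁ mn with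
          | none => lst₁                    -- unreachable (mn ∈ lst₁)
          | some lst₂ => pvALoop k lst₂

def numbers_strip_iterrator (num_list : List Int) (n : Int) : List Int :=
  pvALoop n.toNat num_list

-- ===== PORT B =====
def numbers_strip_iterrator_alt (num_list : List Int) (n : Int) : List Int :=
  let L : Int := num_list.length
  let t : Int := min n (PySem.Int.floordiv (L + 1) 2)
  if 0 < t ∧ L ≤ 2 * t then []
  else if t ≤ 0 then num_list
  else
    let s := PySem.List.sorted num_list (fun x => x)
    let removed : PySem.Dict Int Int :=
      (PySem.List.slice s none (some t) ++ PySem.List.slice s (some (L - t)) none).foldl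
        (fun d v => d.insert v (d.getD v 0 + 1)) PySem.Dict.empty
    let res := num_list.foldl
      (fun (acc : List Int × PySem.Dict Int Int) x =>
        let c := acc.2.getD x 0
        if 0 < c then (acc.1, acc.2.insert x (c - 1)) else (acc.1 ++ [x], acc.2))
      ([], removed)
    res.1

-- ===== PRECONDITION & SPEC =====
def Spec_numbers_strip_iterrator (num_list : List Int) (n : Int) (out : List Int) : Prop := out = numbers_strip_iterrator_alt num_list n
instance (num_list : List Int) (n : Int) (out : List Int) : Decidable (Spec_numbers_strip_iterrator num_list n out) := by unfold Spec_numbers_strip_iterrator; infer_instance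

-- ===== CLAIM (what is proved, stated in full; the proofs are below) =====
def Claim_equal_numbers_strip_iterrator : Prop := ∀ (num_list : List Int) (n : Int), Dom_numbers_strip_iterrator num_list n → Spec_numbers_strip_iterrator num_list n (numbers_strip_iterrator num_list n)

-- ===== LEMMAS AND PROOFS =====

-- Common functional description both ports are reduced to: skip, per value, the
-- number of occurrences the counter prescribes (earliest occurrences first).
def pvSkip : List Int → (Int → Int) → List Int
  | [], _ => []
  | x :: xs, f =>
    if 0 < f x then pvSkip xs (fun v => if v = x then f v - 1 else f v)
    else x :: pvSkip xs f

def pvSort (lst : List Int) : List Int := PySem.List.sorted lst (fun x => x)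

-- removal counter: occurrences of v among the t smallest and the t largest
def pvRC (lst : List Int) (t : Nat) (v : Int) : Int :=
  (List.count v ((pvSort lst).take t) : Int)
  + (List.count v ((pvSort lst).drop (lst.length - t)) : Int)

def pvSpecFn (lst : List Int) (k : Nat) : List Int :=
  pvSkip lst (pvRC lst (min k ((lst.length + 1) / 2)))

lemma pvRC_nonneg (lst : List Int) (t : Nat) (v : Int) : 0 ≤ pvRC lst t v := by
  unfold pvRC; positivity

lemma pvSort_perm (lst : List Int) : (pvSort lst).Perm lst :=
  PySem.List.sorted_perm lst (fun x => x) false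

lemma pvSort_length (lst : List Int) : (pvSort lst).length = lst.length :=
  (pvSort_perm lst).length_eq

lemma pvSort_pairwise (lst : List Int) : (pvSort lst).Pairwise (· ≤ ·) :=
  PySem.List.sorted_pairwise lst (fun x => x)

lemma pvRC_zero (lst : List Int) : pvRC lst 0 = fun _ => 0 := by
  funext v
  unfold pvRC
  rw [Nat.sub_zero, ← pvSort_length lst]
  simp

lemma pvSkip_zero (lst : List Int) : pvSkip lst (fun _ => 0) = lst := by
  induction lst with
  | nil => rfl
  | cons x xs ih => simp [pvSkip, ih]

lemma pvSpecFn_zero (lst : List Int) : pvSpecFn lst 0 = lst := by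
  unfold pvSpecFn
  rw [Nat.min_comm, Nat.min_zero, pvRC_zero, pvSkip_zero]

-- skipping everything empties the list
lemma pvSkip_nil_of_ge (lst : List Int) (f : Int → Int)
    (h : ∀ v, (List.count v lst : Int) ≤ f v) : pvSkip lst f = [] := by
  induction lst generalizing f with
  | nil => rfl
  | cons x xs ih =>
    have hx : (0 : Int) < f x := by
      have := h x; simp [List.count_cons_self] at this
      have : (List.count x xs : Int) + 1 ≤ f x := by exact_mod_cast this
      omega
    simp only [pvSkip, if_pos hx]
    apply ih
    intro v
    by_cases hv : v = x
    · subst hv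
      have := h v; simp [List.count_cons_self] at this
      have : (List.count v xs : Int) + 1 ≤ f v := by exact_mod_cast this
      omega
    · have := h v
      have hxv : ¬ x = v := fun h => hv h.symm
      simp [hxv] at this
      simpa [hv] using this

-- one more prescribed skip of a present value = erasing its first occurrence
lemma pvSkip_erase (lst : List Int) (f : Int → Int) (M : Int)
    (hM : M ∈ lst) (hf : ∀ v, 0 ≤ f v) :
    pvSkip lst (fun v => f v + (if v = M then 1 else 0)) = pvSkip (lst.erase M) f := by
  induction lst generalizing f with
  | nil => cases hM
  | cons x xs ih =>
    by_cases hx : x = M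
    · subst hx
      rw [List.erase_cons_head]
      have hpos : (0:Int) < f x + (if x = x then 1 else 0) := by
        have := hf x; simp; omega
      show (if 0 < f x + (if x = x then 1 else 0) then
          pvSkip xs (fun v => if v = x then (f v + (if v = x then 1 else 0)) - 1
            else f v + (if v = x then 1 else 0))
        else x :: pvSkip xs (fun v => f v + (if v = x then 1 else 0))) = pvSkip xs f
      rw [if_pos hpos]
      congr 1
      funext v
      by_cases hv : v = x <;> simp [hv]
    · have hM' : M ∈ xs := by
        cases hM with
        | head => exact absurd rfl hx
        | tail _ h => exact h
      rw [List.erase_cons_tail (by simpa using hx)]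
      show (if 0 < f x + (if x = M then 1 else 0) then
          pvSkip xs (fun v => if v = x then (f v + (if v = M then 1 else 0)) - 1
            else f v + (if v = M then 1 else 0))
        else x :: pvSkip xs (fun v => f v + (if v = M then 1 else 0))) = pvSkip (x :: xs.erase M) f
      by_cases hpos : 0 < f x
      · have hpos' : (0:Int) < f x + (if x = M then 1 else 0) := by
          simp [hx]; omega
        rw [if_pos hpos']
        show _ = (if 0 < f x then
            pvSkip (xs.erase M) (fun v => if v = x then f v - 1 else f v)
          else x :: pvSkip (xs.erase M) f)
        rw [if_pos hpos]
        have heq : (fun v => if v = x then (f v + (if v = M then 1 else 0)) - 1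
            else f v + (if v = M then 1 else 0))
            = (fun v => (if v = x then f v - 1 else f v) + (if v = M then 1 else 0)) := by
          funext v
          by_cases hv : v = x
          · subst hv; simp [hx]
          · simp [hv]
        rw [heq, ih (fun v => if v = x then f v - 1 else f v) hM'
          (by intro v
              by_cases hv : v = x
              · subst hv; simp only [if_true]; omega
              · simp only []; rw [if_neg hv]; exact hf v)]
      · have hne : ¬ (0:Int) < f x + (if x = M then 1 else 0) := by
          simp [hx]; omega
        rw [if_neg hne]
        show _ = (if 0 < f x then
            pvSkip (xs.erase M) (fun v => if v = x then f v - 1 else f v)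
          else x :: pvSkip (xs.erase M) f)
        rw [if_neg hpos, ih f hM' hf]

-- ===== A-side: the loop computes pvSpecFn =====

lemma pvSkip_rc_nil (lst : List Int) (t : Nat) (h : lst.length ≤ 2 * t) :
    pvSkip lst (pvRC lst t) = [] := by
  apply pvSkip_nil_of_ge
  intro v
  unfold pvRC
  have hc : List.count v lst = List.count v (pvSort lst) :=
    ((pvSort_perm lst).count_eq v).symm
  have hsplit : List.count v (pvSort lst)
      = List.count v ((pvSort lst).take t) + List.count v ((pvSort lst).drop t) := by
    conv_lhs => rw [← List.take_append_drop t (pvSort lst)]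
    rw [List.count_append]
  have hmono : List.count v ((pvSort lst).drop t)
      ≤ List.count v ((pvSort lst).drop (lst.length - t)) := by
    have hd : (pvSort lst).drop t
        = ((pvSort lst).drop (lst.length - t)).drop (t - (lst.length - t)) := by
      rw [List.drop_drop]; congr 1; omega
    rw [hd]; exact (List.drop_sublist _ _).count_le v
  omega

lemma pvPairwise_le_last {mid : List Int} {b : Int} (h : (mid ++ [b]).Pairwise (· ≤ ·)) :
    ∀ x ∈ mid ++ [b], x ≤ b := by
  intro x hx
  rcases List.mem_append.1 hx with h1 | h1
  · exact (List.pairwise_append.1 h).2.2 x h1 b (List.mem_singleton.2 rfl)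
  · rw [List.mem_singleton.1 h1]

-- one full iteration of A's loop advances the spec by one
lemma pvStep_spec (lst : List Int) (M mn : Int) (k : Nat)
    (hL : 2 ≤ lst.length)
    (hmax : PySem.List.max? lst (fun x => x) = some M)
    (hmin : PySem.List.min? (lst.erase M) (fun x => x) = some mn) :
    pvSpecFn ((lst.erase M).erase mn) k = pvSpecFn lst (k + 1) := by
  have hMmem : M ∈ lst := PySem.List.max?_mem hmax
  have hMmax : ∀ y ∈ lst, y ≤ M := PySem.List.max?_isMax hmax
  have hmnmem : mn ∈ lst.erase M := PySem.List.min?_mem hmin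
  have hmnmin : ∀ y ∈ lst.erase M, mn ≤ y := PySem.List.min?_isMin hmin
  have hslen : (pvSort lst).length = lst.length := pvSort_length lst
  -- decompose the sorted list as a :: mid ++ [b]
  obtain ⟨a, rest, hs⟩ : ∃ a rest, pvSort lst = a :: rest := by
    cases hsl : pvSort lst with
    | nil => rw [hsl] at hslen; simp at hslen; omega
    | cons a rest => exact ⟨a, rest, rfl⟩
  have hrne : rest ≠ [] := by
    intro h; rw [hs, h] at hslen; simp at hslen; omega
  obtain ⟨mid, b, hrest⟩ : ∃ mid b, rest = mid ++ [b] :=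
    ⟨rest.dropLast, rest.getLast hrne, (List.dropLast_concat_getLast hrne).symm⟩
  rw [hrest] at hs
  have hperm : (pvSort lst).Perm lst := pvSort_perm lst
  have hpw' : (a :: (mid ++ [b])).Pairwise (· ≤ ·) := hs ▸ pvSort_pairwise lst
  have hble : ∀ x ∈ a :: (mid ++ [b]), x ≤ b := by
    intro x hx
    rcases List.mem_cons.1 hx with h1 | h1
    · subst h1; exact List.rel_of_pairwise_cons hpw' (by simp)
    · exact pvPairwise_le_last (List.pairwise_cons.1 hpw').2 x h1
  have hale : ∀ x ∈ a :: mid, a ≤ x := by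
    intro x hx
    rcases List.mem_cons.1 hx with h1 | h1
    · subst h1; exact le_rfl
    · exact List.rel_of_pairwise_cons hpw' (by simp [h1])
  -- the removed max value is b
  have hMb : M = b := by
    have hbmem : b ∈ lst := hperm.subset (by rw [hs]; simp)
    have hMs : M ∈ a :: (mid ++ [b]) := by rw [← hs]; exact hperm.mem_iff.2 hMmem
    exact le_antisymm (hble M hMs) (hMmax b hbmem)
  -- sorted version of lst.erase M is a :: mid
  have hperm1 : (a :: mid).Perm (lst.erase M) := by
    have h1 : (pvSort lst).Perm (M :: (pvSort lst).erase M) :=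
      List.perm_cons_erase (by rw [hs, hMb]; simp)
    have h2 : (pvSort lst).Perm (M :: (a :: mid)) := by
      rw [hs, hMb]
      have he : a :: (mid ++ [b]) = (a :: mid) ++ [b] := by simp
      rw [he]
      exact List.perm_append_singleton b (a :: mid)
    have h3 : ((pvSort lst).erase M).Perm (a :: mid) :=
      (List.perm_cons M).1 (h1.symm.trans h2)
    exact h3.symm.trans (hperm.erase M)
  -- the removed min value is a
  have hmna : mn = a := by
    have hamem : a ∈ lst.erase M := hperm1.subset (by simp)
    have hmns : mn ∈ a :: mid := hperm1.mem_iff.2 hmnmem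
    exact le_antisymm (hmnmin a hamem) (hale mn hmns)
  -- sorted version of the twice-erased list is mid
  have hpwmid : mid.Pairwise (· ≤ ·) := by
    refine List.Pairwise.sublist ?_ hpw'
    exact (List.sublist_append_left mid [b]).trans (List.sublist_cons_self _ _)
  have hperm2 : mid.Perm ((lst.erase M).erase mn) := by
    have h1 := hperm1.erase mn
    have he : (a :: mid).erase mn = mid := by rw [hmna, List.erase_cons_head]
    rw [he] at h1
    exact h1
  have hsort2 : pvSort ((lst.erase M).erase mn) = mid :=
    PySem.List.sorted_id_eq_of_perm_of_pairwise _ mid hperm2 hpwmid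
  -- lengths
  have hlen : lst.length = mid.length + 2 := by
    rw [← hslen, hs]; simp
  have hlen2 : ((lst.erase M).erase mn).length = mid.length := hperm2.symm.length_eq
  -- the spec step
  set m := mid.length with hm
  set t' := min k ((m + 1) / 2) with ht'def
  have ht' : t' ≤ m := by omega
  have hchain1 : pvSpecFn ((lst.erase M).erase mn) k
      = pvSkip ((lst.erase M).erase mn) (pvRC ((lst.erase M).erase mn) t') := by
    unfold pvSpecFn; rw [hlen2]
  have hnn1 : ∀ v, 0 ≤ pvRC ((lst.erase M).erase mn) t' v := pvRC_nonneg _ _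
  have hnn2 : ∀ v, 0 ≤ pvRC ((lst.erase M).erase mn) t' v + (if v = mn then 1 else 0) := by
    intro v; have h1 := hnn1 v; have h2 := hnn1 mn
    by_cases h : v = mn <;> simp [h] <;> omega
  have hchain2 := (pvSkip_erase (lst.erase M) (pvRC ((lst.erase M).erase mn) t') mn hmnmem hnn1).symm
  have hchain3 := (pvSkip_erase lst
      (fun v => pvRC ((lst.erase M).erase mn) t' v + (if v = mn then 1 else 0)) M hMmem hnn2).symm
  -- the counter identity
  have hTake : (pvSort lst).take (t' + 1) = a :: mid.take t' := by
    rw [hs, List.take_succ_cons, List.take_append_of_le_length ht']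
  have hDrop : (pvSort lst).drop (lst.length - (t' + 1)) = mid.drop (m - t') ++ [b] := by
    rw [hs, hlen]
    have : m + 2 - (t' + 1) = (m - t') + 1 := by omega
    rw [this, List.drop_succ_cons, List.drop_append_of_le_length (by omega)]
  have hrc : (fun v => (pvRC ((lst.erase M).erase mn) t' v + (if v = mn then 1 else 0))
      + (if v = M then 1 else 0)) = pvRC lst (t' + 1) := by
    funext v
    unfold pvRC
    rw [hsort2, hlen2, hTake, hDrop, hmna, hMb]
    by_cases hva : v = a <;> by_cases hvb : v = b <;>
      simp [hva, hvb, List.count_cons, List.count_append] <;> ring_nf <;> omega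
  have hmin' : min (k + 1) ((lst.length + 1) / 2) = t' + 1 := by
    rw [hlen]; omega
  calc pvSpecFn ((lst.erase M).erase mn) k
      = pvSkip ((lst.erase M).erase mn) (pvRC ((lst.erase M).erase mn) t') := hchain1
    _ = pvSkip (lst.erase M) (fun v => pvRC ((lst.erase M).erase mn) t' v + (if v = mn then 1 else 0)) := hchain2
    _ = pvSkip lst (fun v => (pvRC ((lst.erase M).erase mn) t' v + (if v = mn then 1 else 0)) + (if v = M then 1 else 0)) := hchain3
    _ = pvSkip lst (pvRC lst (t' + 1)) := by rw [hrc]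
    _ = pvSpecFn lst (k + 1) := by unfold pvSpecFn; rw [hmin']

lemma pvALoop_spec (k : Nat) (lst : List Int) : pvALoop k lst = pvSpecFn lst k := by
  induction k generalizing lst with
  | zero => exact (pvSpecFn_zero lst).symm
  | succ k ih =>
    rcases hmaxE : PySem.List.max? lst (fun x => x) with _ | M
    · have hnil : lst = [] := (PySem.List.max?_eq_none_iff lst _).1 hmaxE
      subst hnil
      simp [pvALoop, hmaxE, pvSpecFn, pvSkip]
    · have hMmem : M ∈ lst := PySem.List.max?_mem hmaxE
      have hrem1 := PySem.List.remove?_eq_some_erase lst M hMmem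
      have hpos : 1 ≤ lst.length := List.length_pos_of_mem hMmem
      have herlen : (lst.erase M).length = lst.length - 1 := List.length_erase_of_mem hMmem
      rcases hminE : PySem.List.min? (lst.erase M) (fun x => x) with _ | mn
      · have h1 : lst.erase M = [] := (PySem.List.min?_eq_none_iff _ _).1 hminE
        have hlen : lst.length = 1 := by
          rw [h1] at herlen; simp at herlen; omega
        simp only [pvALoop, hmaxE, hrem1, h1]
        exact (pvSkip_rc_nil lst (min (k + 1) ((lst.length + 1) / 2)) (by omega)).symm
      · have hmnmem : mn ∈ lst.erase M := PySem.List.min?_mem hminE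
        have hrem2 := PySem.List.remove?_eq_some_erase _ mn hmnmem
        have hL2 : 2 ≤ lst.length := by
          have := List.length_pos_of_mem hmnmem
          omega
        simp only [pvALoop, hmaxE, hrem1, hminE, hrem2]
        rw [ih]
        exact pvStep_spec lst M mn k hL2 hmaxE hminE

-- ===== B-side: the port computes pvSpecFn =====

-- the decrement-or-keep pass over the counter dict is pvSkip
lemma pvFold_skip (lst : List Int) (d : PySem.Dict Int Int) (acc : List Int) :
    (List.foldl (fun (acc : List Int × PySem.Dict Int Int) x =>
        let c := acc.2.getD x 0
        if 0 < c then (acc.1, acc.2.insert x (c - 1)) else (acc.1 ++ [x], acc.2))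
      (acc, d) lst).1 = acc ++ pvSkip lst (fun v => d.getD v 0) := by
  induction lst generalizing d acc with
  | nil => simp [pvSkip]
  | cons x xs ih =>
    simp only [List.foldl_cons]
    by_cases hc : 0 < d.getD x 0
    · rw [if_pos hc, ih]
      have hf : (fun v => (d.insert x (d.getD x 0 - 1)).getD v 0)
          = (fun v => if v = x then d.getD v 0 - 1 else d.getD v 0) := by
        funext v
        by_cases hv : v = x
        · subst hv; rw [if_pos rfl]; exact PySem.Dict.getD_insert_self d v _ 0
        · rw [if_neg hv]; exact PySem.Dict.getD_insert_of_ne d _ 0 hv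
      rw [hf]
      show acc ++ pvSkip xs _ = acc ++ pvSkip (x :: xs) fun v => d.getD v 0
      rw [show (pvSkip (x :: xs) fun v => d.getD v 0)
          = pvSkip xs (fun v => if v = x then d.getD v 0 - 1 else d.getD v 0) by
        show (if 0 < d.getD x 0 then _ else _) = _
        rw [if_pos hc]]
    · rw [if_neg hc, ih]
      rw [show (pvSkip (x :: xs) fun v => d.getD v 0)
          = x :: pvSkip xs (fun v => d.getD v 0) by
        show (if 0 < d.getD x 0 then _ else _) = _
        rw [if_neg hc]]
      simp

lemma pvAlt_spec (lst : List Int) (n : Int) :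
    numbers_strip_iterrator_alt lst n = pvSpecFn lst n.toNat := by
  unfold numbers_strip_iterrator_alt
  have hceil : PySem.Int.floordiv ((lst.length : Int) + 1) 2 = ((lst.length + 1) / 2 : Nat) := by
    exact_mod_cast PySem.Int.floordiv_natCast (lst.length + 1) 2
  simp only [hceil]
  set c : Nat := (lst.length + 1) / 2 with hc
  set t : Int := min n (c : Int) with htdef
  by_cases h1 : 0 < t ∧ (lst.length : Int) ≤ 2 * t
  · rw [if_pos h1]
    have h2t : lst.length ≤ 2 * min n.toNat c := by
      rcases h1 with ⟨h1a, h1b⟩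
      omega
    exact (pvSkip_rc_nil lst _ h2t).symm
  · rw [if_neg h1]
    by_cases h2 : t ≤ 0
    · rw [if_pos h2]
      have h0 : min n.toNat c = 0 := by omega
      show lst = pvSkip lst (pvRC lst (min n.toNat c))
      rw [h0, pvRC_zero, pvSkip_zero]
    · rw [if_neg h2]
      have htpos : 0 < t := by omega
      have hlt : 2 * t < (lst.length : Int) := by
        by_contra hcon
        exact h1 ⟨htpos, by omega⟩
      have htN : t.toNat = min n.toNat c := by omega
      have htle : t.toNat ≤ lst.length := by omega
      have hs1 : PySem.List.slice (pvSort lst) none (some t) = (pvSort lst).take t.toNat :=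
        PySem.List.slice_to _ (by omega)
      have hs2 : PySem.List.slice (pvSort lst) (some ((lst.length : Int) - t)) none
          = (pvSort lst).drop (lst.length - t.toNat) := by
        rw [PySem.List.slice_from _ (by omega : (0:Int) ≤ (lst.length : Int) - t)]
        congr 1
        omega
      show (List.foldl _ ([], _) lst).1 = _
      rw [show (PySem.List.sorted lst fun x => x) = pvSort lst from rfl, hs1, hs2, PySem.Dict.foldl_insert_getD_add_one_eq_counter, pvFold_skip,
        List.nil_append]
      have hf : (fun v => (PySem.Dict.counter
            ((pvSort lst).take t.toNat ++ (pvSort lst).drop (lst.length - t.toNat))).getD v 0)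
          = pvRC lst (min n.toNat c) := by
        funext v
        rw [PySem.Dict.getD_counter]
        unfold pvRC
        rw [List.count_append, ← htN]
        push_cast
        ring
      rw [hf]
      rfl

-- ===== VERDICT (by name: the statement is the Claim_ definition above) =====
theorem numbers_strip_iterrator_spec : Claim_equal_numbers_strip_iterrator := by
  intro num_list n _
  unfold Spec_numbers_strip_iterrator numbers_strip_iterrator
  rw [pvALoop_spec, pvAlt_spec]
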